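-- pv_equiv track=rewrite | github.com/tonalnik/tonalnik_telegram_bot | romb.py | romb
-- ===== SOURCE A (Python) =====
-- def romb(oldv):
--     v = int(oldv)
--     znak = "*"
--     n = int(v - 2)
--     m = int(v)
--     s = []
--     z = v * 2 - 1
--     for i in range (z):
--             s.append([' '] * z)
--     s[0][v - 1] = znak
--     s[z - 1][v - 1] = znak
--     for i in range (z):
--         for j in range (z):
--             if i != 0 and i != z - 1:
--                 s[i][n] = znak
--                 s[i][m] = znak
--         if i != 0 and i < v - 1:
--             m += 1
--             n -= 1
--         if i != z - 1 and i >= v - 1: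
--             m -= 1
--             n += 1
--     return s
-- ===== SOURCE B (Python) =====
-- def romb(oldv):
--     v = int(oldv)
--     z = v * 2 - 1
--     c = v - 1
--     s = [[' '] * z for _ in range(z)]
--     s[0][c] = '*'
--     s[z - 1][c] = '*'
--     for i in range(1, z - 1):
--         off = min(i, z - 1 - i)
--         s[i][c - off] = '*'
--         s[i][c + off] = '*'
--     return s
-- ===== Notes on version B (the rewrite author's own statement) =====
-- stated objective: alternative
-- what changed: replaces A's stateful n/m pointer walk and its redundant inner j-loop (2z assignments per interior row) by a direct per-row closed-form offset min(i, z-1-i) with exactly two assignments per row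
-- outside the precondition, e.g. on romb(0): A raises IndexError, B raises IndexError
import Mathlib
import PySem

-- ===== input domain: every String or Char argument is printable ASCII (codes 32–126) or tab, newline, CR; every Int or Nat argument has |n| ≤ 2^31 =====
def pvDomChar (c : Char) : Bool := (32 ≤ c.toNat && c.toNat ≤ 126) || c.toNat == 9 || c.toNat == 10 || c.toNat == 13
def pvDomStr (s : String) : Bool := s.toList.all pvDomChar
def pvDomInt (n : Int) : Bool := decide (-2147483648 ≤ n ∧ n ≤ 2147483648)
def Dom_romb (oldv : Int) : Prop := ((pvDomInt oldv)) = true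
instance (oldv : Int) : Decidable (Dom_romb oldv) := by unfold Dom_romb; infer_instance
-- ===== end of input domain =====

-- B replaces A's stateful n/m pointer walk and its redundant inner j-loop (2·z assignments per
-- interior row) by a closed-form per-row offset min(i, z-1-i) with exactly two assignments per row.

-- ===== PORT A =====
def romb (oldv : Int) : List (List String) :=
  let v : Int := oldv                -- int(oldv) on an int is the identity
  let znak : String := "*"
  let n : Int := v - 2
  let m : Int := v
  let z : Int := v * 2 - 1
  let s : List (List String) :=
    (PySem.List.pyRange 0 z 1).foldl (fun s _ => s ++ [List.replicate z.toNat " "]) []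
  let s := PySem.List.pySetD s 0 (PySem.List.pySetD (PySem.List.pyGetD s 0 []) (v - 1) znak)
  let s := PySem.List.pySetD s (z - 1)
      (PySem.List.pySetD (PySem.List.pyGetD s (z - 1) []) (v - 1) znak)
  let res := (PySem.List.pyRange 0 z 1).foldl
    (fun st i =>
      let s :=
        (PySem.List.pyRange 0 z 1).foldl
          (fun s _ =>
            if i ≠ 0 ∧ i ≠ z - 1 then
              let s := PySem.List.pySetD s i
                  (PySem.List.pySetD (PySem.List.pyGetD s i []) st.2.1 znak)
              PySem.List.pySetD s i
                  (PySem.List.pySetD (PySem.List.pyGetD s i []) st.2.2 znak)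
            else s) st.1
      let nm := if i ≠ 0 ∧ i < v - 1 then (st.2.1 - 1, st.2.2 + 1) else (st.2.1, st.2.2)
      let nm := if i ≠ z - 1 ∧ i ≥ v - 1 then (nm.1 + 1, nm.2 - 1) else nm
      (s, nm)) (s, n, m)
  res.1

-- ===== PORT B =====
def romb_alt (oldv : Int) : List (List String) :=
  let v : Int := oldv
  let z : Int := v * 2 - 1
  let c : Int := v - 1
  let s : List (List String) :=
    (PySem.List.pyRange 0 z 1).map (fun _ => List.replicate z.toNat " ")
  let s := PySem.List.pySetD s 0 (PySem.List.pySetD (PySem.List.pyGetD s 0 []) c "*")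
  let s := PySem.List.pySetD s (z - 1)
      (PySem.List.pySetD (PySem.List.pyGetD s (z - 1) []) c "*")
  (PySem.List.pyRange 1 (z - 1) 1).foldl
    (fun s i =>
      let off := min i (z - 1 - i)
      let s := PySem.List.pySetD s i
          (PySem.List.pySetD (PySem.List.pyGetD s i []) (c - off) "*")
      PySem.List.pySetD s i
          (PySem.List.pySetD (PySem.List.pyGetD s i []) (c + off) "*")) s

-- ===== PRECONDITION & SPEC =====
-- On oldv ≤ 0 the grid s is empty and Python A raises IndexError at s[0]; B raises there too.
def Pre_romb (oldv : Int) : Prop := 1 ≤ oldv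
instance (oldv : Int) : Decidable (Pre_romb oldv) := by unfold Pre_romb; infer_instance
def pvWitness_romb : Int := (3)
def Spec_romb (oldv : Int) (out : List (List String)) : Prop := out = romb_alt oldv
instance (oldv : Int) (out : List (List String)) : Decidable (Spec_romb oldv out) := by
  unfold Spec_romb; infer_instance

-- ===== CLAIM (what is proved, stated in full; the proofs are below) =====
def Claim_equal_romb : Prop := ∀ (oldv : Int), Dom_romb oldv → Pre_romb oldv → Spec_romb oldv (romb oldv)

-- ===== LEMMAS AND PROOFS =====

-- row operation: row[n] = "*"; row[m] = "*"
def pvRowOp (n m : Int) (r : List String) : List String :=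
  PySem.List.pySetD (PySem.List.pySetD r n "*") m "*"

-- grid operation: s[i][n] = "*"; s[i][m] = "*"
def pvRowSet (i n m : Int) (s : List (List String)) : List (List String) :=
  PySem.List.pySetD s i (pvRowOp n m (PySem.List.pyGetD s i []))

-- closed forms for A's n/m pointers at the start of iteration i
def pvN (v i : Int) : Int := if i = 0 then v - 2 else v - 1 - min i (v * 2 - 1 - 1 - i)
def pvM (v i : Int) : Int := if i = 0 then v else v - 1 + min i (v * 2 - 1 - 1 - i)

-- A's loop body as a named function (definitionally the port's inline lambda)
def pvStepA (v : Int) (st : List (List String) × Int × Int) (i : Int) :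
    List (List String) × Int × Int :=
  let s :=
    (PySem.List.pyRange 0 (v * 2 - 1) 1).foldl
      (fun s _ =>
        if i ≠ 0 ∧ i ≠ v * 2 - 1 - 1 then
          let s := PySem.List.pySetD s i
              (PySem.List.pySetD (PySem.List.pyGetD s i []) st.2.1 "*")
          PySem.List.pySetD s i
              (PySem.List.pySetD (PySem.List.pyGetD s i []) st.2.2 "*")
        else s) st.1
  let nm := if i ≠ 0 ∧ i < v - 1 then (st.2.1 - 1, st.2.2 + 1) else (st.2.1, st.2.2)
  let nm := if i ≠ v * 2 - 1 - 1 ∧ i ≥ v - 1 then (nm.1 + 1, nm.2 - 1) else nm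
  (s, nm)

-- A's loop body with the pointer state replaced by its closed form
def pvStepPure (v : Int) (s : List (List String)) (i : Int) : List (List String) :=
  if i ≠ 0 ∧ i ≠ v * 2 - 1 - 1 then pvRowSet i (pvN v i) (pvM v i) s else s

-- B's loop body with the two statements fused
def pvStepPureB (v : Int) (s : List (List String)) (i : Int) : List (List String) :=
  pvRowSet i (v - 1 - min i (v * 2 - 1 - 1 - i)) (v - 1 + min i (v * 2 - 1 - 1 - i)) s

-- the blank z×z grid
def pvBlank (v : Int) : List (List String) :=
  (PySem.List.pyRange 0 (v * 2 - 1) 1).map (fun _ => List.replicate (v * 2 - 1).toNat " ")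

-- A's initial grid (blank built by append-fold, then the two centre cells)
def pvInitA (v : Int) : List (List String) :=
  let b := (PySem.List.pyRange 0 (v * 2 - 1) 1).foldl
      (fun s _ => s ++ [List.replicate (v * 2 - 1).toNat " "]) []
  let s := PySem.List.pySetD b 0 (PySem.List.pySetD (PySem.List.pyGetD b 0 []) (v - 1) "*")
  PySem.List.pySetD s (v * 2 - 1 - 1)
    (PySem.List.pySetD (PySem.List.pyGetD s (v * 2 - 1 - 1) []) (v - 1) "*")

-- B's initial grid (blank built by comprehension, then the two centre cells)
def pvInitB (v : Int) : List (List String) :=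
  let b := pvBlank v
  let s := PySem.List.pySetD b 0 (PySem.List.pySetD (PySem.List.pyGetD b 0 []) (v - 1) "*")
  PySem.List.pySetD s (v * 2 - 1 - 1)
    (PySem.List.pySetD (PySem.List.pyGetD s (v * 2 - 1 - 1) []) (v - 1) "*")

lemma pv_get_set (s : List (List String)) (i j : Int) (x : List String)
    (hi0 : 0 ≤ i) (hi : i < (s.length : Int)) (hj0 : 0 ≤ j) (hj : j < (s.length : Int)) :
    PySem.List.pyGetD (PySem.List.pySetD s i x) j []
      = if j = i then x else PySem.List.pyGetD s j [] := by
  rw [PySem.List.pySetD_of_nonneg s x hi0]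
  rw [PySem.List.pyGetD_eq_getElem _ _ hj0 (by simpa using hj)]
  rw [List.getElem_set]
  by_cases hji : j = i
  · subst hji; simp
  · rw [if_neg (by omega), if_neg hji, PySem.List.pyGetD_eq_getElem _ _ hj0 hj]

lemma pv_set_set (s : List (List String)) (i : Int) (a b : List String) (hi0 : 0 ≤ i) :
    PySem.List.pySetD (PySem.List.pySetD s i a) i b = PySem.List.pySetD s i b := by
  rw [PySem.List.pySetD_of_nonneg s a hi0, PySem.List.pySetD_of_nonneg _ b hi0,
    PySem.List.pySetD_of_nonneg s b hi0, List.set_set]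

-- the two consecutive Python statements s[i][n] = "*"; s[i][m] = "*" fuse into pvRowSet
lemma pv_two_stmt (s : List (List String)) (i n m : Int)
    (hi0 : 0 ≤ i) (hi : i < (s.length : Int)) :
    PySem.List.pySetD (PySem.List.pySetD s i (PySem.List.pySetD (PySem.List.pyGetD s i []) n "*")) i
      (PySem.List.pySetD
        (PySem.List.pyGetD
          (PySem.List.pySetD s i (PySem.List.pySetD (PySem.List.pyGetD s i []) n "*")) i [])
        m "*")
      = pvRowSet i n m s := by
  rw [pv_get_set _ i i _ hi0 hi hi0 hi, if_pos rfl, pv_set_set _ _ _ _ hi0]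
  rfl

lemma pv_len_rowSet (s : List (List String)) (i n m : Int) :
    (pvRowSet i n m s).length = s.length := by
  simp [pvRowSet]

lemma pvRowOp_idem (r : List String) (n m : Int) (hn : 0 ≤ n) (hm : 0 ≤ m) :
    pvRowOp n m (pvRowOp n m r) = pvRowOp n m r := by
  unfold pvRowOp
  rw [PySem.List.pySetD_of_nonneg _ _ hn, PySem.List.pySetD_of_nonneg _ _ hm,
    PySem.List.pySetD_of_nonneg _ _ hn, PySem.List.pySetD_of_nonneg _ _ hm]
  by_cases hnm : n.toNat = m.toNat
  · rw [hnm]; simp [List.set_set]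
  · apply List.ext_getElem (by simp)
    intro k h1 h2
    simp only [List.getElem_set]
    split_ifs <;> rfl

lemma pvRowSet_idem (s : List (List String)) (i n m : Int)
    (hi0 : 0 ≤ i) (hi : i < (s.length : Int)) (hn : 0 ≤ n) (hm : 0 ≤ m) :
    pvRowSet i n m (pvRowSet i n m s) = pvRowSet i n m s := by
  conv_lhs => rw [pvRowSet, pvRowSet]
  rw [pv_get_set _ i i _ hi0 (by simpa [pv_len_rowSet] using hi) hi0
    (by simpa [pv_len_rowSet] using hi), if_pos rfl, pv_set_set _ _ _ _ hi0,
    pvRowOp_idem _ _ _ hn hm]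
  rfl

lemma pv_foldl_id {a b : Type} (l : List b) (s : a) :
    l.foldl (fun s _ => s) s = s := by
  induction l generalizing s with
  | nil => rfl
  | cons x l ih => simpa using ih s

lemma pv_foldl_const {a b : Type} (T : a → a) (s : a) (hT : T (T s) = T s) :
    ∀ l : List b, l ≠ [] → l.foldl (fun s _ => T s) s = T s := by
  have aux : ∀ l : List b, l.foldl (fun s _ => T s) (T s) = T s := by
    intro l
    induction l with
    | nil => rfl
    | cons x l ih =>
        simp only [List.foldl_cons]
        rw [hT]
        exact ih
  intro l hl
  cases l with
  | nil => exact absurd rfl hl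
  | cons x l => simpa using aux l

-- characterisation of a fold that conditionally rewrites one (distinct) row per step
lemma pv_grid_foldl (p : Int → Prop) [DecidablePred p] (u : Int → List String → List String)
    (step : List (List String) → Int → List (List String))
    (hstep : ∀ s i, step s i =
      if p i then PySem.List.pySetD s i (u i (PySem.List.pyGetD s i [])) else s) :
    ∀ (l : List Int) (s : List (List String)), l.Nodup →
      (∀ i ∈ l, 0 ≤ i ∧ i < (s.length : Int)) →
      (l.foldl step s).length = s.length ∧
      ∀ j : Int, 0 ≤ j → j < (s.length : Int) →
        PySem.List.pyGetD (l.foldl step s) j [] =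
          if j ∈ l ∧ p j then u j (PySem.List.pyGetD s j []) else PySem.List.pyGetD s j [] := by
  intro l
  induction l with
  | nil => intro s _ _; simp
  | cons i l ih =>
      intro s hnd hb
      have hi := hb i (by simp)
      have hlen : (step s i).length = s.length := by
        rw [hstep]; split <;> simp
      have hb' : ∀ i' ∈ l, 0 ≤ i' ∧ i' < ((step s i).length : Int) := by
        intro i' hi'; rw [hlen]; exact hb i' (by simp [hi'])
      have hstep_get : ∀ j : Int, 0 ≤ j → j < (s.length : Int) →
          PySem.List.pyGetD (step s i) j [] =
            if j = i ∧ p i then u i (PySem.List.pyGetD s i []) else PySem.List.pyGetD s j [] := by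
        intro j hj0 hj
        rw [hstep]
        by_cases hp : p i
        · rw [if_pos hp, pv_get_set _ _ _ _ hi.1 hi.2 hj0 hj]
          by_cases hji : j = i
          · subst hji; simp [hp]
          · simp [hji]
        · simp [hp]
      obtain ⟨ihl, ihg⟩ := ih (step s i) (List.nodup_cons.mp hnd).2 hb'
      constructor
      · simp only [List.foldl_cons]; rw [ihl, hlen]
      · intro j hj0 hj
        have hinotl : i ∉ l := (List.nodup_cons.mp hnd).1
        simp only [List.foldl_cons]
        rw [ihg j hj0 (by rw [hlen]; exact hj)]
        by_cases hjl : j ∈ l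
        · have hji : j ≠ i := fun h => hinotl (h ▸ hjl)
          rw [hstep_get j hj0 hj]
          simp [hjl, hji]
        · by_cases hji : j = i
          · subst hji
            rw [hstep_get j hj0 hj]
            by_cases hp : p j <;> simp [hp, hjl]
          · rw [hstep_get j hj0 hj]
            simp [hjl, hji]

lemma pv_ext (s t : List (List String)) (h : s.length = t.length)
    (hj : ∀ j : Int, 0 ≤ j → j < (s.length : Int) →
      PySem.List.pyGetD s j [] = PySem.List.pyGetD t j []) : s = t := by
  apply List.ext_getElem h
  intro k h1 h2
  have := hj k (by omega) (by omega)
  rw [PySem.List.pyGetD_eq_getElem _ _ (by omega) (by exact_mod_cast h1),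
    PySem.List.pyGetD_eq_getElem _ _ (by omega) (by exact_mod_cast h2)] at this
  simpa using this

-- the body of A's inner j-loop for an interior row (definitionally the port's two statements)
def pvT (k n m : Int) (s : List (List String)) : List (List String) :=
  PySem.List.pySetD (PySem.List.pySetD s k (PySem.List.pySetD (PySem.List.pyGetD s k []) n "*")) k
    (PySem.List.pySetD
      (PySem.List.pyGetD
        (PySem.List.pySetD s k (PySem.List.pySetD (PySem.List.pyGetD s k []) n "*")) k [])
      m "*")

lemma pv_range_ne_nil (v : Int) (hv : 2 ≤ v) : PySem.List.pyRange 0 (v * 2 - 1) 1 ≠ [] := by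
  intro h
  have := PySem.List.length_pyRange_one 0 (v * 2 - 1)
  rw [h] at this
  simp at this
  omega

-- the grid part of one iteration of A's loop
lemma pv_stepA_fst (v : Int) (hv : 2 ≤ v) (k n m : Int)
    (hn : 0 ≤ n) (hm : 0 ≤ m)
    (s : List (List String)) (hs : s.length = (v * 2 - 1).toNat) (h0 : 0 ≤ k)
    (hk : k < v * 2 - 1) :
    (pvStepA v (s, n, m) k).1 =
      if k ≠ 0 ∧ k ≠ v * 2 - 1 - 1 then pvRowSet k n m s else s := by
  have hsZ : (s.length : Int) = v * 2 - 1 := by rw [hs]; omega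
  have hkl : k < (s.length : Int) := by omega
  show (PySem.List.pyRange 0 (v * 2 - 1) 1).foldl
      (fun s' (_ : Int) => if k ≠ 0 ∧ k ≠ v * 2 - 1 - 1 then pvT k n m s' else s') s
    = if k ≠ 0 ∧ k ≠ v * 2 - 1 - 1 then pvRowSet k n m s else s
  have hT : ∀ s' : List (List String), (s'.length : Int) = v * 2 - 1 →
      pvT k n m s' = pvRowSet k n m s' := by
    intro s' h
    exact pv_two_stmt s' k n m h0 (by omega)
  by_cases hc : k ≠ 0 ∧ k ≠ v * 2 - 1 - 1
  · have hfun : (fun s' (_ : Int) => if k ≠ 0 ∧ k ≠ v * 2 - 1 - 1 then pvT k n m s' else s')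
        = fun s' (_ : Int) => pvT k n m s' := by
      funext s' x; rw [if_pos hc]
    rw [hfun, if_pos hc]
    have hTT : pvT k n m (pvT k n m s) = pvT k n m s := by
      rw [hT s hsZ, hT _ (by rw [pv_len_rowSet]; exact hsZ),
        pvRowSet_idem s k n m h0 hkl hn hm]
    rw [pv_foldl_const (pvT k n m) s hTT _ (pv_range_ne_nil v hv), hT s hsZ]
  · have hfun : (fun s' (_ : Int) => if k ≠ 0 ∧ k ≠ v * 2 - 1 - 1 then pvT k n m s' else s')
        = fun s' (_ : Int) => s' := by
      funext s' x; rw [if_neg hc]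
    rw [hfun, if_neg hc, pv_foldl_id]

-- the pointer part of one iteration of A's loop follows the closed form
lemma pv_stepA_snd (v k : Int) (hv : 2 ≤ v) (h0 : 0 ≤ k) (hk : k < v * 2 - 2)
    (st : List (List String) × Int × Int) (hst : st.2 = (pvN v k, pvM v k)) :
    (pvStepA v st k).2 = (pvN v (k + 1), pvM v (k + 1)) := by
  have h1 : st.2.1 = pvN v k := by rw [hst]
  have h2 : st.2.2 = pvM v k := by rw [hst]
  show (if k ≠ v * 2 - 1 - 1 ∧ k ≥ v - 1 then
          ((if k ≠ 0 ∧ k < v - 1 then (st.2.1 - 1, st.2.2 + 1) else (st.2.1, st.2.2)).1 + 1,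
           (if k ≠ 0 ∧ k < v - 1 then (st.2.1 - 1, st.2.2 + 1) else (st.2.1, st.2.2)).2 - 1)
        else if k ≠ 0 ∧ k < v - 1 then (st.2.1 - 1, st.2.2 + 1) else (st.2.1, st.2.2))
      = (pvN v (k + 1), pvM v (k + 1))
  rw [h1, h2, Prod.ext_iff]
  constructor <;> (unfold pvN pvM; split_ifs <;> simp_all <;> omega)

lemma pvN_nonneg (v i : Int) (hv : 2 ≤ v) (h0 : 0 ≤ i) (hi : i < v * 2 - 1) :
    0 ≤ pvN v i := by
  unfold pvN; split <;> omega

lemma pvM_nonneg (v i : Int) (hv : 2 ≤ v) (h0 : 0 ≤ i) (hi : i < v * 2 - 1) :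
    0 ≤ pvM v i := by
  unfold pvM; split <;> omega

lemma pv_stepPure_len (v : Int) (s : List (List String)) (i : Int) :
    (pvStepPure v s i).length = s.length := by
  unfold pvStepPure; split <;> simp [pv_len_rowSet]

-- A's stateful loop computes the same grid as the pure per-row loop
lemma pv_decouple (v : Int) (hv : 2 ≤ v) :
    ∀ (t : Nat) (k : Int), 0 ≤ k → k + t = v * 2 - 1 →
      ∀ s : List (List String), s.length = (v * 2 - 1).toNat →
        ((PySem.List.pyRange k (v * 2 - 1) 1).foldl (pvStepA v) (s, pvN v k, pvM v k)).1
          = (PySem.List.pyRange k (v * 2 - 1) 1).foldl (pvStepPure v) s := by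
  intro t
  induction t with
  | zero =>
      intro k h0 hkz s hs
      have hemp : PySem.List.pyRange k (v * 2 - 1) 1 = [] := by
        apply List.eq_nil_of_length_eq_zero
        rw [PySem.List.length_pyRange_one]; omega
      rw [hemp]; rfl
  | succ t ih =>
      intro k h0 hkz s hs
      have hk : k < v * 2 - 1 := by omega
      rw [PySem.List.pyRange_one_cons hk]
      simp only [List.foldl_cons]
      have hfst : (pvStepA v (s, pvN v k, pvM v k) k).1 = pvStepPure v s k := by
        rw [pv_stepA_fst v hv k (pvN v k) (pvM v k) (pvN_nonneg v k hv h0 hk)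
          (pvM_nonneg v k hv h0 hk) s hs h0 hk]
        rfl
      cases t with
      | zero =>
          have hemp : PySem.List.pyRange (k + 1) (v * 2 - 1) 1 = [] := by
            apply List.eq_nil_of_length_eq_zero
            rw [PySem.List.length_pyRange_one]; omega
          rw [hemp]
          simpa using hfst
      | succ t' =>
          have hsnd := pv_stepA_snd v k hv h0 (by omega) (s, pvN v k, pvM v k) rfl
          have hstep : pvStepA v (s, pvN v k, pvM v k) k
              = (pvStepPure v s k, pvN v (k + 1), pvM v (k + 1)) := by
            exact Prod.ext hfst hsnd
          rw [hstep]
          exact ih (k + 1) (by omega) (by omega) (pvStepPure v s k)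
            (by rw [pv_stepPure_len]; exact hs)

lemma pv_foldl_congr {a : Type} (f g : List (List String) → a → List (List String)) (L : Nat) :
    ∀ (l : List a) (s : List (List String)), s.length = L →
      (∀ x ∈ l, ∀ s', s'.length = L → f s' x = g s' x ∧ (g s' x).length = L) →
      l.foldl f s = l.foldl g s := by
  intro l
  induction l with
  | nil => intro s _ _; rfl
  | cons x l ih =>
      intro s hs h
      have hx := h x (by simp) s hs
      simp only [List.foldl_cons, hx.1]
      exact ih (g s x) hx.2 (fun y hy => h y (by simp [hy]))

lemma pv_initA_eq (v : Int) : pvInitA v = pvInitB v := by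
  unfold pvInitA pvInitB pvBlank
  rw [PySem.List.foldl_append_singleton_eq_map, List.nil_append]

lemma pv_initB_len (v : Int) (hv : 1 ≤ v) : (pvInitB v).length = (v * 2 - 1).toNat := by
  simp [pvInitB, pvBlank, PySem.List.length_pyRange_one]

-- main case v ≥ 2
lemma pv_main (v : Int) (hv : 2 ≤ v) : romb v = romb_alt v := by
  have hlen : (pvInitB v).length = (v * 2 - 1).toNat := pv_initB_len v (by omega)
  have hlenZ : ((pvInitB v).length : Int) = v * 2 - 1 := by rw [hlen]; omega
  -- A as a pure per-row fold
  have hA : romb v = (PySem.List.pyRange 0 (v * 2 - 1) 1).foldl (pvStepPure v) (pvInitB v) := by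
    have h0 : romb v
        = ((PySem.List.pyRange 0 (v * 2 - 1) 1).foldl (pvStepA v) (pvInitA v, v - 2, v)).1 := rfl
    rw [h0, pv_initA_eq]
    have hd := pv_decouple v hv (v * 2 - 1).toNat 0 le_rfl (by omega) (pvInitB v) hlen
    have hN0 : pvN v 0 = v - 2 := by unfold pvN; rw [if_pos rfl]
    have hM0 : pvM v 0 = v := by unfold pvM; rw [if_pos rfl]
    rw [hN0, hM0] at hd
    exact hd
  -- B with the two statements fused
  have hB : romb_alt v = (PySem.List.pyRange 1 (v * 2 - 1 - 1) 1).foldl (pvStepPureB v) (pvInitB v) := by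
    have h0 : romb_alt v = (PySem.List.pyRange 1 (v * 2 - 1 - 1) 1).foldl
        (fun s i =>
          PySem.List.pySetD
            (PySem.List.pySetD s i
              (PySem.List.pySetD (PySem.List.pyGetD s i []) (v - 1 - min i (v * 2 - 1 - 1 - i)) "*")) i
            (PySem.List.pySetD
              (PySem.List.pyGetD
                (PySem.List.pySetD s i
                  (PySem.List.pySetD (PySem.List.pyGetD s i [])
                    (v - 1 - min i (v * 2 - 1 - 1 - i)) "*")) i [])
              (v - 1 + min i (v * 2 - 1 - 1 - i)) "*")) (pvInitB v) := rfl
    rw [h0]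
    apply pv_foldl_congr _ _ ((v * 2 - 1).toNat) _ _ hlen
    intro i hi s' hs'
    have hmem := (PySem.List.mem_pyRange_one).mp hi
    have hs'Z : (s'.length : Int) = v * 2 - 1 := by rw [hs']; omega
    refine ⟨pv_two_stmt s' i _ _ (by omega) (by omega), ?_⟩
    unfold pvStepPureB
    rw [pv_len_rowSet]; exact hs'
  obtain ⟨lenA, getA⟩ := pv_grid_foldl (fun i => i ≠ 0 ∧ i ≠ v * 2 - 1 - 1)
    (fun i row => pvRowOp (pvN v i) (pvM v i) row) (pvStepPure v) (fun s i => rfl)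
    (PySem.List.pyRange 0 (v * 2 - 1) 1) (pvInitB v) (PySem.List.nodup_pyRange_one _ _)
    (by intro i hi; have := (PySem.List.mem_pyRange_one).mp hi; omega)
  obtain ⟨lenB, getB⟩ := pv_grid_foldl (fun _ => True)
    (fun i row => pvRowOp (v - 1 - min i (v * 2 - 1 - 1 - i)) (v - 1 + min i (v * 2 - 1 - 1 - i)) row)
    (pvStepPureB v) (fun s i => by simp [pvStepPureB, pvRowSet])
    (PySem.List.pyRange 1 (v * 2 - 1 - 1) 1) (pvInitB v) (PySem.List.nodup_pyRange_one _ _)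
    (by intro i hi; have := (PySem.List.mem_pyRange_one).mp hi; omega)
  rw [hA, hB]
  apply pv_ext _ _ (by rw [lenA, lenB])
  intro j hj0 hj
  rw [lenA] at hj
  rw [getA j hj0 hj, getB j hj0 hj]
  simp only [PySem.List.mem_pyRange_one, and_true]
  have hjz : j < v * 2 - 1 := by omega
  by_cases hin : 1 ≤ j ∧ j < v * 2 - 1 - 1
  · rw [if_pos (show (0 ≤ j ∧ j < v * 2 - 1) ∧ j ≠ 0 ∧ j ≠ v * 2 - 1 - 1 by
        refine ⟨⟨hj0, hjz⟩, ?_, ?_⟩ <;> omega),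
      if_pos (show 1 ≤ j ∧ j < v * 2 - 1 - 1 from hin)]
    have hN : pvN v j = v - 1 - min j (v * 2 - 1 - 1 - j) := by
      unfold pvN; rw [if_neg (by omega : ¬ j = 0)]
    have hM : pvM v j = v - 1 + min j (v * 2 - 1 - 1 - j) := by
      unfold pvM; rw [if_neg (by omega : ¬ j = 0)]
    rw [hN, hM]
  · rw [if_neg (by omega), if_neg (by omega)]

-- ===== VERDICT (by name: the statement is the Claim_ definition above) =====
theorem romb_spec : Claim_equal_romb := by
  intro oldv _ hpre
  unfold Spec_romb
  rcases eq_or_lt_of_le hpre with h1 | h2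
  · cases h1; decide
  · exact pv_main oldv (by omega)
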